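-- pv_equiv track=rewrite | github.com/Matt-Hurd/GBAVideoDecomp | InternalELF/research_scripts/load_from_mmstr.py | decode_from_bytestring
-- ===== SOURCE A (Python) =====
-- def decode_from_bytestring(encoded_bytes):
--     # Reverse mapping for special characters, from encoded byte values back to characters
--     reverse_special_char_mapping = {
--         -1: ' ', -2: '\n', 63: '.', 64: ',', 65: ':', 66: ';',
--         67: '!', 68: '?', 69: '&', 70: '(', 71: ')', 72: '\'',
--         73: '-', 74: '/', 75: '+', 76: '\xA9', 77: '\x99',
--         78: '_', 79: '$', 80: '"', 81: '<', 82: '>', 83: '*',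
--         84: '=', 85: '\xAE', 86: '#', 87: '@', 88: '%', 89: '\\',
--         90: '~', 91: '[', 92: ']',
--     }
--
--     # Convert negative keys to their correct byte representation in Python (0-255 range)
--     reverse_special_char_mapping = {key & 0xFF: value for key, value in reverse_special_char_mapping.items()}
--
--     # Initialize an empty string for the result
--     result = ""
--
--     for byte in encoded_bytes:
--         if byte in reverse_special_char_mapping:
--             result += reverse_special_char_mapping[byte]
--         elif 1 <= byte <= 10:  # Encoded Digits
--             result += chr(byte + 47)
--         elif 11 <= byte <= 36:  # Encoded Lowercase letters
--             result += chr(byte + 86)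
--         elif 37 <= byte <= 62:  # Encoded Uppercase letters
--             result += chr(byte + 28)
--         else:
--             # Directly append other characters (this may not be necessary unless there are byte values not covered above)
--             result += chr(byte)
--
--     return result
-- ===== SOURCE B (Python) =====
-- SPECIALS = ".,:;!?&()'-/+\xa9\x99_$\"<>*=\xae#@%\\~[]"   # decoded chars for bytes 63..92, in order
-- BOUNDS = (1, 11, 37, 63, 93, 254, 255, 256)              # breakpoints of the piecewise decode map
-- DECODERS = (chr,                                 # b < 1 : passthrough
--             lambda b: chr(b + 47),               # 1..10 : digits
--             lambda b: chr(b + 86),               # 11..36: lowercase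
--             lambda b: chr(b + 28),               # 37..62: uppercase
--             lambda b: SPECIALS[b - 63],          # 63..92: special characters
--             chr,                                 # 93..253: passthrough
--             lambda b: '\n',                      # 254
--             lambda b: ' ',                       # 255
--             chr)                                 # >= 256: passthrough
--
-- def _decode_byte(b):
--     # segment index = how many breakpoints lie at or below b (linear bisect_right)
--     seg = sum(t <= b for t in BOUNDS)
--     return DECODERS[seg](b)
--
-- def decode_from_bytestring(encoded_bytes):
--     return ''.join(map(_decode_byte, encoded_bytes))
-- ===== Notes on version B (the rewrite author's own statement) =====
-- stated objective: alternative
-- what changed: Replaced A's dict-membership test plus if/elif range chain with a piecewise-decode view: a sorted breakpoint tuple partitions the byte values into 9 segments, the segment index is found by counting breakpoints <= byte (a linear bisect_right), and a per-segment decoder (affine chr shift, index into one specials string, constants, passthrough) is selected from a tuple.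
import Mathlib
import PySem

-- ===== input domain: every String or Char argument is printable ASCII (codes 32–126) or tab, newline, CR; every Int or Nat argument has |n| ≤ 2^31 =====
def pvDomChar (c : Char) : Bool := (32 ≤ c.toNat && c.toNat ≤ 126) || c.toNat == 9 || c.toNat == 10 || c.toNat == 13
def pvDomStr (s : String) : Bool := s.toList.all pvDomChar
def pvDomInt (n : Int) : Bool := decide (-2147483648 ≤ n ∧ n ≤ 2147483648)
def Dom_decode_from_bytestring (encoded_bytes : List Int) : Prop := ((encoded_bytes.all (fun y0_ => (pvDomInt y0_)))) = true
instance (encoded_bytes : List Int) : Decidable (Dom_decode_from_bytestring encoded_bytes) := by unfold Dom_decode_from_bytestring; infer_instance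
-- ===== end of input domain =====

-- B views the decoding as a piecewise map: a sorted breakpoint list splits the byte values
-- into 9 segments (segment found by counting breakpoints ≤ byte, a linear bisect_right) and
-- a per-segment decoder is applied, instead of A's dict-membership + if/elif chain (objective: alternative).

-- chr(b): exact on the Pre_ domain 0 ≤ b ≤ 0x10FFFF excluding surrogates (where Python's chr raises / yields a lone surrogate)
def pyChr (b : Int) : Char := Char.ofNat b.toNat

-- ===== PORT A =====
-- the dict literal from A, before the `& 0xFF` re-keying comprehension
def pvSpecialPairs : List (Int × Char) :=
  [(-1, ' '), (-2, '\n'), (63, '.'), (64, ','), (65, ':'), (66, ';'),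
   (67, '!'), (68, '?'), (69, '&'), (70, '('), (71, ')'), (72, '\''),
   (73, '-'), (74, '/'), (75, '+'), (76, '\xA9'), (77, '\x99'),
   (78, '_'), (79, '$'), (80, '"'), (81, '<'), (82, '>'), (83, '*'),
   (84, '='), (85, '\xAE'), (86, '#'), (87, '@'), (88, '%'), (89, '\\'),
   (90, '~'), (91, '['), (92, ']')]

-- {key & 0xFF: value for key, value in reverse_special_char_mapping.items()}
def pvRevMapA : PySem.Dict Int Char :=
  PySem.Dict.ofList ((PySem.Dict.ofList pvSpecialPairs).items.map
    (fun p => (PySem.Int.band p.1 255, p.2)))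

def decode_from_bytestring (encoded_bytes : List Int) : String :=
  String.ofList (encoded_bytes.foldl (fun result b =>
    if pvRevMapA.contains b then result ++ [pvRevMapA.getD b ' ']   -- d[byte] under the contains guard
    else if 1 ≤ b ∧ b ≤ 10 then result ++ [pyChr (b + 47)]
    else if 11 ≤ b ∧ b ≤ 36 then result ++ [pyChr (b + 86)]
    else if 37 ≤ b ∧ b ≤ 62 then result ++ [pyChr (b + 28)]
    else result ++ [pyChr b]) [])

-- ===== PORT B =====
-- SPECIALS: decoded characters for bytes 63..92, in order
def pvSpecials : List Char :=
  ['.', ',', ':', ';', '!', '?', '&', '(', ')', '\'', '-', '/', '+', '\xA9', '\x99',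
   '_', '$', '"', '<', '>', '*', '=', '\xAE', '#', '@', '%', '\\', '~', '[', ']']

-- BOUNDS: breakpoints of the piecewise decode map
def pvBounds : List Int := [1, 11, 37, 63, 93, 254, 255, 256]

-- _decode_byte: seg = sum(t <= b for t in BOUNDS); DECODERS[seg](b)
def pvDecodeByte (b : Int) : Char :=
  let seg : Nat := (pvBounds.map (fun t => if t ≤ b then 1 else 0)).sum
  match seg with
  | 0 => pyChr b                                        -- b < 1 : passthrough
  | 1 => pyChr (b + 47)                                 -- digits
  | 2 => pyChr (b + 86)                                 -- lowercase
  | 3 => pyChr (b + 28)                                 -- uppercase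
  | 4 => (PySem.List.pyGet? pvSpecials (b - 63)).getD ' '  -- SPECIALS[b-63]; index in range on segment 4
  | 5 => pyChr b                                        -- 93..253: passthrough
  | 6 => '\n'                                           -- 254
  | 7 => ' '                                            -- 255
  | _ => pyChr b                                        -- ≥ 256: passthrough

def decode_from_bytestring_alt (encoded_bytes : List Int) : String :=
  String.ofList (encoded_bytes.map pvDecodeByte)

-- ===== PRECONDITION & SPEC =====
-- Pre_ excludes (a) bytes on which A's chr(byte) raises ValueError (negative or ≥ 0x110000)
-- and (b) bytes in the surrogate range 0xD800–0xDFFF, on which A returns a lone-surrogate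
-- string that is not a value of the Lean String type.
def Pre_decode_from_bytestring (encoded_bytes : List Int) : Prop :=
  ∀ b ∈ encoded_bytes, 0 ≤ b ∧ b < 1114112 ∧ ¬ (55296 ≤ b ∧ b < 57344)
instance (encoded_bytes : List Int) : Decidable (Pre_decode_from_bytestring encoded_bytes) := by
  unfold Pre_decode_from_bytestring; infer_instance

def pvWitness_decode_from_bytestring : List Int := [18, 15, 22, 22, 25, 255, 38, 63]

def Spec_decode_from_bytestring (encoded_bytes : List Int) (out : String) : Prop := out = decode_from_bytestring_alt encoded_bytes
instance (encoded_bytes : List Int) (out : String) : Decidable (Spec_decode_from_bytestring encoded_bytes out) := by unfold Spec_decode_from_bytestring; infer_instance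

-- ===== CLAIM (what is proved, stated in full; the proofs are below) =====
def Claim_equal_decode_from_bytestring : Prop := ∀ (encoded_bytes : List Int), Dom_decode_from_bytestring encoded_bytes → Pre_decode_from_bytestring encoded_bytes → Spec_decode_from_bytestring encoded_bytes (decode_from_bytestring encoded_bytes)

-- ===== LEMMAS AND PROOFS =====

-- per-byte value of A's loop body (proof-only)
def pvCharA (b : Int) : Char :=
  if pvRevMapA.contains b then pvRevMapA.getD b ' '
  else if 1 ≤ b ∧ b ≤ 10 then pyChr (b + 47)
  else if 11 ≤ b ∧ b ≤ 36 then pyChr (b + 86)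
  else if 37 ≤ b ∧ b ≤ 62 then pyChr (b + 28)
  else pyChr b

-- A's branch chain picks exactly B's piecewise decoder's value, for EVERY Int b
set_option maxRecDepth 40000 in
set_option maxHeartbeats 4000000 in
theorem pv_char_eq (b : Int) : pvCharA b = pvDecodeByte b := by
  by_cases h0 : 0 ≤ b ∧ b ≤ 255
  · obtain ⟨h1, h2⟩ := h0
    interval_cases b <;> decide
  · -- b < 0 or b > 255: both sides are the passthrough pyChr b
    have hseg : (pvBounds.map (fun t => if t ≤ b then 1 else 0)).sum = (if b < 1 then 0 else 8) := by
      simp only [pvBounds, List.map, List.sum_cons, List.sum_nil]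
      split_ifs <;> omega
    have hB : pvDecodeByte b = pyChr b := by
      unfold pvDecodeByte
      rw [hseg]
      by_cases hb : b < 1 <;> simp [hb]
    have kA : pvRevMapA.keys.all (fun k => decide (0 ≤ k ∧ k ≤ 255)) = true := by decide
    have hA : b ∉ pvRevMapA.keys := fun hmem => by
      have := List.all_eq_true.mp kA _ hmem; simp at this; omega
    rw [hB]
    unfold pvCharA
    rw [if_neg, if_neg, if_neg, if_neg]
    · omega
    · omega
    · omega
    · rw [PySem.Dict.contains_eq_decide_mem_keys]
      simpa using hA

theorem pv_fold_step (r : List Char) (b : Int) :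
    (if pvRevMapA.contains b then r ++ [pvRevMapA.getD b ' ']
     else if 1 ≤ b ∧ b ≤ 10 then r ++ [pyChr (b + 47)]
     else if 11 ≤ b ∧ b ≤ 36 then r ++ [pyChr (b + 86)]
     else if 37 ≤ b ∧ b ≤ 62 then r ++ [pyChr (b + 28)]
     else r ++ [pyChr b]) = r ++ [pvCharA b] := by
  unfold pvCharA; split_ifs <;> rfl

-- ===== VERDICT (by name: the statement is the Claim_ definition above) =====
theorem decode_from_bytestring_spec : Claim_equal_decode_from_bytestring := by
  intro xs _ _
  unfold Spec_decode_from_bytestring decode_from_bytestring decode_from_bytestring_alt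
  congr 1
  have hstep : (fun (result : List Char) (b : Int) =>
      if pvRevMapA.contains b then result ++ [pvRevMapA.getD b ' ']
      else if 1 ≤ b ∧ b ≤ 10 then result ++ [pyChr (b + 47)]
      else if 11 ≤ b ∧ b ≤ 36 then result ++ [pyChr (b + 86)]
      else if 37 ≤ b ∧ b ≤ 62 then result ++ [pyChr (b + 28)]
      else result ++ [pyChr b]) =
      fun result b => result ++ [pvDecodeByte b] :=
    funext fun r => funext fun b => by rw [pv_fold_step r b, pv_char_eq b]
  rw [hstep, PySem.List.foldl_append_singleton_eq_map, List.nil_append]
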